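-- pv_equiv track=rewrite | github.com/xile42/leetcode | python3/2025 年浦东新区人工智能创新应用竞赛 Q3 灯光调整.py | lightAdjustment
-- ===== SOURCE A (Python) =====
-- from typing import List
--
-- def lightAdjustment(brightness: List[int]) -> int:
--
--     n = len(brightness)
--     ns = [brightness[i] - brightness[0] for i in range(n)]
--     diff = [0] + [ns[i] - ns[i - 1] for i in range(1, n)]
--
--     a = b = 0
--     for v in diff:
--         if v > 0:
--             a += v
--         else:
--             b += -v
--
--     return max(a, b)
-- ===== SOURCE B (Python) =====
-- from typing import List
--
-- def lightAdjustment(brightness: List[int]) -> int: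
--     if not brightness:
--         return 0
--     s = 0
--     for x, y in zip(brightness, brightness[1:]):
--         s += abs(y - x)
--     return (s + abs(brightness[-1] - brightness[0])) // 2
-- ===== Notes on version B (the rewrite author's own statement) =====
-- stated objective: alternative
-- what changed: Instead of building a normalized list plus a diff array and splitting each diff into positive/negative accumulators with a final max, B sums the total variation S = sum of |adjacent differences| in one pass and returns the closed form (S + |last - first|) // 2, via the identity max(P,N) = ((P+N) + |P-N|)/2 with P+N = S and P-N = last-first; no intermediate lists are built.
import Mathlib
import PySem

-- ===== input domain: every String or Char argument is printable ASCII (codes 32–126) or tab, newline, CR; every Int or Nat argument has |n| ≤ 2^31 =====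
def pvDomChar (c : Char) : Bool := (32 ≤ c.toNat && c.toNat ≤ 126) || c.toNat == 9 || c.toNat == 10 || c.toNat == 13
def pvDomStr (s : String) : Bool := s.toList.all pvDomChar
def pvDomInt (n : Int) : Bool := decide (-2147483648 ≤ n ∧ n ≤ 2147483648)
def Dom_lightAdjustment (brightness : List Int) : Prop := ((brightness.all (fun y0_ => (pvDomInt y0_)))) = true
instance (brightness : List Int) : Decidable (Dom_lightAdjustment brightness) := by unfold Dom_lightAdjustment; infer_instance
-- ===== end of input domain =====

-- B replaces A's diff-array pos/neg accumulators and max by one total-variation pass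
-- (sum of |adjacent differences|) and the closed form (S + |last - first|) // 2
-- (objective: alternative, O(1) extra space).

-- ===== PORT A =====
def lightAdjustment (brightness : List Int) : Int :=
  let n : Int := brightness.length
  let ns : List Int := (PySem.List.pyRange 0 n 1).map
    (fun i => PySem.List.pyGetD brightness i 0 - PySem.List.pyGetD brightness 0 0)
  let diff : List Int := [0] ++ (PySem.List.pyRange 1 n 1).map
    (fun i => PySem.List.pyGetD ns i 0 - PySem.List.pyGetD ns (i - 1) 0)
  let ab : Int × Int := diff.foldl
    (fun ab v => if v > 0 then (ab.1 + v, ab.2) else (ab.1, ab.2 + (-v))) (0, 0)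
  max ab.1 ab.2

-- ===== PORT B =====
def lightAdjustment_alt (brightness : List Int) : Int :=
  match brightness with
  | [] => 0
  | _ :: _ =>
    let s : Int := (brightness.zip (PySem.List.slice brightness (some 1) none)).foldl
      (fun s p => s + |p.2 - p.1|) 0
    PySem.Int.floordiv
      (s + |PySem.List.pyGetD brightness (-1) 0 - PySem.List.pyGetD brightness 0 0|) 2

-- ===== PRECONDITION & SPEC =====
def Spec_lightAdjustment (brightness : List Int) (out : Int) : Prop := out = lightAdjustment_alt brightness
instance (brightness : List Int) (out : Int) : Decidable (Spec_lightAdjustment brightness out) := by unfold Spec_lightAdjustment; infer_instance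

-- ===== CLAIM =====
def Claim_equal_lightAdjustment : Prop := ∀ (brightness : List Int), Dom_lightAdjustment brightness → Spec_lightAdjustment brightness (lightAdjustment brightness)

-- ===== LEMMAS AND PROOFS =====

-- consecutive differences of a list
def pvDiffs (l : List Int) : List Int := (l.zip (l.drop 1)).map (fun p => p.2 - p.1)

-- A's loop accumulates the positive and negated-negative parts separately.
theorem pvFoldAB (l : List Int) (a b : Int) :
    l.foldl (fun (ab : Int × Int) v => if v > 0 then (ab.1 + v, ab.2) else (ab.1, ab.2 + (-v))) (a, b)
      = (a + (l.map (fun v => max v 0)).sum, b + (l.map (fun v => max (-v) 0)).sum) := by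
  induction l generalizing a b with
  | nil => simp
  | cons x xs ih =>
      simp only [List.foldl_cons, List.map_cons, List.sum_cons]
      split_ifs with h <;> rw [ih] <;> simp only [Prod.mk.injEq] <;> constructor <;> omega

-- |v| splits into the two one-sided parts.
theorem pvAbsSplit (l : List Int) :
    (l.map (fun v => |v|)).sum
      = (l.map (fun v => max v 0)).sum + (l.map (fun v => max (-v) 0)).sum := by
  induction l with
  | nil => simp
  | cons x xs ih =>
      simp only [List.map_cons, List.sum_cons, ih]
      rcases le_total 0 x with h | h
      · rw [abs_of_nonneg h]; omega
      · rw [abs_of_nonpos h]; omega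

theorem pvPosSubNeg (l : List Int) :
    (l.map (fun v => max v 0)).sum - (l.map (fun v => max (-v) 0)).sum = l.sum := by
  induction l with
  | nil => simp
  | cons x xs ih => simp only [List.map_cons, List.sum_cons]; omega

theorem pvDiffsSum (t : List Int) : ∀ h : Int,
    (pvDiffs (h :: t)).sum = (h :: t).getLast (by simp) - h := by
  induction t with
  | nil => intro h; simp [pvDiffs]
  | cons y t ih =>
      intro h
      have : pvDiffs (h :: y :: t) = (y - h) :: pvDiffs (y :: t) := by
        simp [pvDiffs]
      rw [this, List.sum_cons, ih y, List.getLast_cons_cons]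
      omega

-- A's diff-array tail is exactly the list of consecutive differences.
theorem pvDiffTail (l : List Int) :
    (PySem.List.pyRange 1 (l.length : Int) 1).map
        (fun i =>
          PySem.List.pyGetD ((PySem.List.pyRange 0 (l.length : Int) 1).map
            (fun j => PySem.List.pyGetD l j 0 - PySem.List.pyGetD l 0 0)) i 0
          - PySem.List.pyGetD ((PySem.List.pyRange 0 (l.length : Int) 1).map
            (fun j => PySem.List.pyGetD l j 0 - PySem.List.pyGetD l 0 0)) (i - 1) 0)
      = pvDiffs l := by
  apply List.ext_getElem
  · simp [PySem.List.length_pyRange_one, pvDiffs, List.length_zip]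
  · intro k h1 h2
    have hk : (k : Int) < (l.length : Int) - 1 := by
      have h1' := h1
      simp only [List.length_map, PySem.List.length_pyRange_one] at h1'
      omega
    have hkl : k + 1 < l.length := by exact_mod_cast (by omega : (k : Int) + 1 < (l.length : Int))
    rw [List.getElem_map, PySem.List.getElem_pyRange_one]
    rw [PySem.List.pyGetD_map_pyRange_of_nonneg _ _ _ _ (by omega) (by omega)]
    rw [PySem.List.pyGetD_map_pyRange_of_nonneg _ _ _ _ (by omega) (by omega)]
    have e1 : PySem.List.pyGetD l (1 + (k : Int)) 0 = l[k + 1] := by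
      rw [PySem.List.pyGetD_eq_getElem l 0 (by omega) (by omega)]
      congr 1
      omega
    have e2 : PySem.List.pyGetD l (1 + (k : Int) - 1) 0 = l[k] := by
      rw [PySem.List.pyGetD_eq_getElem l 0 (by omega) (by omega)]
      congr 1
      omega
    rw [e1, e2]
    simp only [pvDiffs, List.getElem_map, List.getElem_zip]
    simp

-- B's loop sums the absolute consecutive differences.
theorem pvAltFold (l : List Int) (a : Int) :
    (l.zip (l.drop 1)).foldl (fun a p => a + |p.2 - p.1|) a
      = a + ((pvDiffs l).map (fun v => |v|)).sum := by
  unfold pvDiffs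
  induction (l.zip (l.drop 1)) generalizing a with
  | nil => simp
  | cons p ps ih => simp only [List.foldl_cons, List.map_cons, List.sum_cons, ih]; ring

-- ===== VERDICT =====
theorem lightAdjustment_spec : Claim_equal_lightAdjustment := by
  intro brightness _
  unfold Spec_lightAdjustment
  match brightness with
  | [] => decide
  | h :: t =>
    have halt : lightAdjustment_alt (h :: t)
        = PySem.Int.floordiv
            (((pvDiffs (h :: t)).map (fun v => |v|)).sum
              + |(h :: t).getLast (by simp) - h|) 2 := by
      show PySem.Int.floordiv
            ((let s : Int := ((h :: t).zip (PySem.List.slice (h :: t) (some 1) none)).foldl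
                (fun s p => s + |p.2 - p.1|) 0
              s) + |PySem.List.pyGetD (h :: t) (-1) 0 - PySem.List.pyGetD (h :: t) 0 0|) 2 = _
      rw [PySem.List.slice_from_one, ← List.drop_one, pvAltFold,
        PySem.List.pyGetD_neg_one _ _ (by simp), PySem.List.pyGetD_zero_cons]
      ring_nf
    show max _ _ = _
    rw [pvDiffTail (h :: t)]
    rw [show ([(0 : Int)] ++ pvDiffs (h :: t)) = (0 :: pvDiffs (h :: t)) from rfl]
    rw [pvFoldAB, halt]
    have hsum := pvDiffsSum t h
    have hpn := pvPosSubNeg (pvDiffs (h :: t))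
    have habs := pvAbsSplit (pvDiffs (h :: t))
    set P := ((pvDiffs (h :: t)).map (fun v => max v 0)).sum with hP
    set N := ((pvDiffs (h :: t)).map (fun v => max (-v) 0)).sum with hN
    set S := ((pvDiffs (h :: t)).map (fun v => |v|)).sum with hS
    set Δ := (h :: t).getLast (by simp) - h with hΔ
    have h2 : S + |Δ| = 2 * max (0 + P) (0 + N) := by
      rcases le_total 0 Δ with hd | hd
      · rw [abs_of_nonneg hd]
        rcases le_total P N with hpq | hpq <;> omega
      · rw [abs_of_nonpos hd]
        rcases le_total P N with hpq | hpq <;> omega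
    simp only [List.map_cons, List.sum_cons] at *
    rw [h2, PySem.Int.floordiv_eq_ediv_of_pos (by norm_num), Int.mul_ediv_cancel_left _ (by norm_num)]
    simp only [max_self, neg_zero, zero_add, ← hP, ← hN]
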